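-- pv_equiv track=rewrite | github.com/yuueuni/HackerRank | programmers/hash/marathon.py | solution
-- ===== SOURCE A (Python) =====
-- def solution(participant, completion):
--     answer = []
--     for person in participant:
--         if person not in answer:
--             completion_person = completion.count(person)
--             participant_person = participant.count(person)
--             count_person = participant_person - completion_person
--             for _ in range(count_person):
--                 answer.append(person)
--     return ','.join(answer)
-- ===== SOURCE B (Python) =====
-- def solution(participant, completion):
--     counts = {}
--     for p in participant:
--         counts[p] = counts.get(p, 0) + 1
--     for c in completion:
--         if c in counts:
--             counts[c] -= 1
--     return ','.join(p for p, n in counts.items() for _ in range(n))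
-- ===== Notes on version B (the rewrite author's own statement) =====
-- stated objective: faster
-- what changed: Replaces A's per-person repeated .count scans over both lists and the 'not in answer' dedup scan (quadratic/cubic) with one counting pass building a dict, one decrement pass over completion, and a single flattening join over the dict items.
import Mathlib
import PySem

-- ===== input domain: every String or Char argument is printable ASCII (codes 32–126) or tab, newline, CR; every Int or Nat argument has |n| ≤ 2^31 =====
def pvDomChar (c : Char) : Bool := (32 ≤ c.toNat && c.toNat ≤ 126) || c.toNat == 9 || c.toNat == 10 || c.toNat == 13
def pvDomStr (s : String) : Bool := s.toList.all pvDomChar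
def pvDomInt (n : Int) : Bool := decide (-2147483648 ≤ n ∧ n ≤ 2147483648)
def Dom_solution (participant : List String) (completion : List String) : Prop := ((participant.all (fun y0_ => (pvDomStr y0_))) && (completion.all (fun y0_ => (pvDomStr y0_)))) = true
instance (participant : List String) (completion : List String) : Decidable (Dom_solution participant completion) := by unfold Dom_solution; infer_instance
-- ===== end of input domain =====

-- B replaces A's per-person repeated .count scans and dedup membership scan with two
-- counting passes over a dict and one flattening join: objective 'faster'.

-- ===== PORT A =====
-- the loop body: if person not in answer, append person (participant.count - completion.count) times
def solutionStepA (participant : List String) (completion : List String)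
    (answer : List String) (person : String) : List String :=
  if person ∈ answer then answer
  else
    let completion_person : Int := PySem.List.count completion person
    let participant_person : Int := PySem.List.count participant person
    let count_person := participant_person - completion_person
    (PySem.List.pyRange 0 count_person 1).foldl (fun a _ => a ++ [person]) answer

def solution (participant : List String) (completion : List String) : String :=
  let answer := participant.foldl (solutionStepA participant completion) []
  PySem.Str.join "," answer

-- ===== PORT B =====
def solution_alt (participant : List String) (completion : List String) : String :=
  let counts := participant.foldl (fun d p => d.insert p (d.getD p 0 + 1))
      (PySem.Dict.empty : PySem.Dict String Int)
  let counts := completion.foldl (fun d c => if d.contains c then d.modify c 0 (· - 1) else d) counts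
  PySem.Str.join ","
    (counts.items.flatMap (fun pn => (PySem.List.pyRange 0 pn.2 1).map (fun _ => pn.1)))

-- ===== PRECONDITION & SPEC =====
def Spec_solution (participant : List String) (completion : List String) (out : String) : Prop := out = solution_alt participant completion
instance (participant : List String) (completion : List String) (out : String) : Decidable (Spec_solution participant completion out) := by unfold Spec_solution; infer_instance

-- ===== CLAIM (what is proved, stated in full; the proofs are below) =====
def Claim_equal_solution : Prop := ∀ (participant : List String) (completion : List String), Dom_solution participant completion → Spec_solution participant completion (solution participant completion)

-- ===== LEMMAS AND PROOFS =====

-- common reference shape: for each distinct participant (first-appearance order),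
-- (count in participant − count in completion) copies
def repBlock (P : List String) (C : List String) (p : String) : List String :=
  List.replicate ((PySem.List.count P p : Int) - (PySem.List.count C p : Int)).toNat p

-- range(0,n) folded with "append person" appends n.toNat copies
theorem foldl_pyRange_append (n : Int) (p : String) (acc : List String) :
    (PySem.List.pyRange 0 n 1).foldl (fun a _ => a ++ [p]) acc
      = acc ++ List.replicate n.toNat p := by
  rw [PySem.List.pyRange_one, PySem.List.foldl_append_singleton_eq_map (fun _ => p)]
  simp [Function.comp_def, List.map_const']

theorem map_pyRange_const (n : Int) (p : String) :
    (PySem.List.pyRange 0 n 1).map (fun _ => p) = List.replicate n.toNat p := by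
  rw [PySem.List.pyRange_one, List.map_map]
  simp [Function.comp_def, List.map_const']

theorem mem_flatMap_repBlock (P C : List String) (S : List String) (x : String) :
    x ∈ S.flatMap (repBlock P C) ↔
      x ∈ S ∧ 0 < (PySem.List.count P x : Int) - (PySem.List.count C x : Int) := by
  simp only [List.mem_flatMap, repBlock, List.mem_replicate]
  constructor
  · rintro ⟨s, hs, hne, rfl⟩
    exact ⟨hs, by omega⟩
  · rintro ⟨hx, hpos⟩
    exact ⟨x, hx, by omega, rfl⟩

-- A's loop invariant: starting from the flattened blocks of a seen-set S,
-- processing the rest extends S by the fresh names in order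
theorem foldl_stepA_eq (P C : List String) (l : List String) (S : PySem.Set String) :
    l.foldl (solutionStepA P C) (S.flatMap (repBlock P C))
      = (PySem.Set.update S l).flatMap (repBlock P C) := by
  induction l generalizing S with
  | nil => simp [PySem.Set.update_nil]
  | cons person rest ih =>
    rw [List.foldl_cons, PySem.Set.update_cons]
    have hstep : solutionStepA P C (S.flatMap (repBlock P C)) person
        = (PySem.Set.add S person).flatMap (repBlock P C) := by
      simp only [solutionStepA]
      by_cases hmem : person ∈ S.flatMap (repBlock P C)
      · rw [if_pos hmem]
        have := (mem_flatMap_repBlock P C S person).mp hmem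
        rw [PySem.Set.add_of_mem this.1]
      · rw [if_neg hmem, foldl_pyRange_append]
        by_cases hS : person ∈ S
        · -- person seen, but its block is empty: count difference ≤ 0
          have hle : (PySem.List.count P person : Int) - (PySem.List.count C person : Int) ≤ 0 := by
            by_contra h
            exact hmem ((mem_flatMap_repBlock P C S person).mpr ⟨hS, by omega⟩)
          have h0 : ((PySem.List.count P person : Int) - (PySem.List.count C person : Int)).toNat = 0 := by
            omega
          rw [PySem.Set.add_of_mem hS, h0]
          simp
        · rw [PySem.Set.add_of_not_mem hS, List.flatMap_append]
          simp [repBlock]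
    rw [hstep, ih]

-- A's answer list in reference shape
theorem answerA_eq (P C : List String) :
    P.foldl (solutionStepA P C) [] = (PySem.Set.ofList P).flatMap (repBlock P C) := by
  have h := foldl_stepA_eq P C P ([] : PySem.Set String)
  simpa [PySem.Set.update_nil_left] using h

-- B's decrement pass leaves keys unchanged
theorem keys_subFold (l : List String) (d : PySem.Dict String Int) :
    (l.foldl (fun d c => if d.contains c then d.modify c 0 (· - 1) else d) d).keys = d.keys := by
  induction l generalizing d with
  | nil => rfl
  | cons c rest ih =>
    rw [List.foldl_cons]
    by_cases hc : d.contains c = true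
    · rw [if_pos hc, ih, PySem.Dict.keys_modify]
      exact PySem.Dict.keys_insert_of_contains d _ hc
    · rw [if_neg hc, ih]

-- B's decrement pass: effect on a looked-up value
theorem getD_subFold (l : List String) (d : PySem.Dict String Int) (p : String) :
    (l.foldl (fun d c => if d.contains c then d.modify c 0 (· - 1) else d) d).getD p 0
      = d.getD p 0 - (if d.contains p = true then (l.count p : Int) else 0) := by
  induction l generalizing d with
  | nil => simp
  | cons c rest ih =>
    rw [List.foldl_cons]
    by_cases hc : d.contains c = true
    · rw [if_pos hc, ih, PySem.Dict.getD_modify, PySem.Dict.contains_modify]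
      by_cases hpc : p = c
      · subst hpc
        simp only [beq_self_eq_true, Bool.true_or, if_pos hc, List.count_cons_self, if_true]
        push_cast
        ring
      · have hcp : c ≠ p := fun h => hpc h.symm
        rw [if_neg hpc, List.count_cons_of_ne hcp]
        simp [hpc]
    · rw [if_neg hc, ih]
      by_cases hpc : p = c
      · subst hpc
        simp [hc]
      · have hcp : c ≠ p := fun h => hpc h.symm
        rw [List.count_cons_of_ne hcp]

-- B's final dict: items = the reference keys (first occurrences) with net counts
theorem itemsB_eq (P C : List String) :
    (C.foldl (fun d c => if d.contains c then d.modify c 0 (· - 1) else d)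
        (P.foldl (fun d p => d.insert p (d.getD p 0 + 1)) (PySem.Dict.empty : PySem.Dict String Int))).items
      = (PySem.Set.ofList P).map
          (fun k => (k, (PySem.List.count P k : Int) - (PySem.List.count C k : Int))) := by
  rw [PySem.Dict.foldl_insert_getD_add_one_eq_counter]
  have hkeys : (C.foldl (fun d c => if d.contains c then d.modify c 0 (· - 1) else d)
      (PySem.Dict.counter P)).keys = PySem.Set.ofList P := by
    rw [keys_subFold, PySem.Dict.keys_counter]
  have hnodup : (C.foldl (fun d c => if d.contains c then d.modify c 0 (· - 1) else d)
      (PySem.Dict.counter P)).keys.Nodup := by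
    rw [hkeys]; exact PySem.Set.nodup_ofList P
  rw [PySem.Dict.items_eq_map_keys _ hnodup (0 : Int), hkeys]
  apply List.map_congr_left
  intro k hk
  have hmemP : k ∈ P := (PySem.Set.mem_ofList P k).mp hk
  have hcont : (PySem.Dict.counter P).contains k = true := by
    rw [PySem.Dict.contains_counter]; simpa using hmemP
  rw [getD_subFold, if_pos hcont, PySem.Dict.getD_counter]
  simp [PySem.List.count_eq]

-- B's output list is the same flattened reference shape
theorem listB_eq (P C : List String) :
    ((C.foldl (fun d c => if d.contains c then d.modify c 0 (· - 1) else d)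
        (P.foldl (fun d p => d.insert p (d.getD p 0 + 1)) (PySem.Dict.empty : PySem.Dict String Int))).items.flatMap
      (fun pn => (PySem.List.pyRange 0 pn.2 1).map (fun _ => pn.1)))
      = (PySem.Set.ofList P).flatMap (repBlock P C) := by
  rw [itemsB_eq, List.flatMap_map]
  congr 1
  funext k
  show (PySem.List.pyRange 0 ((PySem.List.count P k : Int) - (PySem.List.count C k : Int)) 1).map
      (fun _ => k) = repBlock P C k
  rw [map_pyRange_const]
  rfl

-- ===== VERDICT (by name: the statement is the Claim_ definition above) =====
theorem solution_spec : Claim_equal_solution := by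
  intro P C _
  show solution P C = solution_alt P C
  simp only [solution, solution_alt]
  rw [answerA_eq, ← listB_eq]
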